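-- pv_equiv track=rewrite | github.com/hamidrezavalidi/Political-Districting-to-Minimize-Cut-Edges | PythonCodes/hess.py | most_possible_nodes_in_one_district
-- ===== SOURCE A (Python) =====
-- def most_possible_nodes_in_one_district(DG, population, U):
--     cumulative_population = 0
--     num_nodes=0
--     for ipopulation in sorted(population):
--         cumulative_population += ipopulation
--         num_nodes+=1
--         if cumulative_population>U:
--             return num_nodes-1
-- ===== SOURCE B (Python) =====
-- def most_possible_nodes_in_one_district(DG, population, U):
--     # Two-pass: build the table of sorted prefix sums once, then count its
--     # leading entries that fit within U; None when every prefix fits.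
--     prefix = []
--     s = 0
--     for p in sorted(population):
--         s += p
--         prefix.append(s)
--     n = 0
--     while n < len(prefix) and prefix[n] <= U:
--         n += 1
--     return n if n < len(prefix) else None
-- ===== Notes on version B (the rewrite author's own statement) =====
-- stated objective: alternative
-- what changed: A accumulates and counts inside one early-returning loop; B first builds the full table of sorted prefix sums, then separately counts its leading entries that are <= U, returning that count (or None when all prefixes fit).
import Mathlib
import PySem

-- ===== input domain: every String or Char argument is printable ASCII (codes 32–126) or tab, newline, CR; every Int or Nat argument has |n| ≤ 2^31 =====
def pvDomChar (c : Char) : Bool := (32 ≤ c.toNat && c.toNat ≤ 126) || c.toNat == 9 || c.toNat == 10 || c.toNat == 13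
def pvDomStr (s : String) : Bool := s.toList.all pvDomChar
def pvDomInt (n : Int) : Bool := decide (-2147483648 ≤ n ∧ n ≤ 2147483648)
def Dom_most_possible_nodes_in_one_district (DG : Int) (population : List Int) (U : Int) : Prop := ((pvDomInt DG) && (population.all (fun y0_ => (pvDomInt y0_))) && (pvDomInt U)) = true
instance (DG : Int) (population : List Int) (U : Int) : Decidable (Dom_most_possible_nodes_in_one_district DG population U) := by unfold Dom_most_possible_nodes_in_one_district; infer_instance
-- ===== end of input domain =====

-- B builds the table of sorted prefix sums first, then counts its leading entries ≤ U
-- (A instead accumulates and counts inside one early-returning loop); same result, same cost.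

-- ===== PORT A =====
-- the for-loop of A: state (cumulative_population, num_nodes), early return on cum > U
def mpnLoopA (U : Int) : List Int → Int → Int → Option Int
  | [], _, _ => none
  | p :: rest, cum, num =>
    if cum + p > U then some (num + 1 - 1)
    else mpnLoopA U rest (cum + p) (num + 1)

def most_possible_nodes_in_one_district (DG : Int) (population : List Int) (U : Int) : Option Int :=
  mpnLoopA U (PySem.List.sorted population (fun x => x) false) 0 0

-- ===== PORT B =====
-- the first loop of Source B: prefix sums starting from accumulator s
def mpnAccum (s : Int) : List Int → List Int
  | [] => []
  | p :: rest => (s + p) :: mpnAccum (s + p) rest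

def most_possible_nodes_in_one_district_alt (DG : Int) (population : List Int) (U : Int) : Option Int :=
  let pf := mpnAccum 0 (PySem.List.sorted population (fun x => x) false)
  -- the while-loop of Source B: count leading entries of pf that are ≤ U
  let n := (pf.takeWhile (fun s => decide (s ≤ U))).length
  if (n : Int) < (pf.length : Int) then some (n : Int) else none

-- ===== PRECONDITION & SPEC =====
def Spec_most_possible_nodes_in_one_district (DG : Int) (population : List Int) (U : Int) (out : Option Int) : Prop := out = most_possible_nodes_in_one_district_alt DG population U
instance (DG : Int) (population : List Int) (U : Int) (out : Option Int) : Decidable (Spec_most_possible_nodes_in_one_district DG population U out) := by unfold Spec_most_possible_nodes_in_one_district; infer_instance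

-- ===== CLAIM (what is proved, stated in full; the proofs are below) =====
def Claim_equal_most_possible_nodes_in_one_district : Prop := ∀ (DG : Int) (population : List Int) (U : Int), Dom_most_possible_nodes_in_one_district DG population U → Spec_most_possible_nodes_in_one_district DG population U (most_possible_nodes_in_one_district DG population U)

-- ===== LEMMAS AND PROOFS =====
-- A's loop on any list l with accumulators (c, k) equals B's table-then-count on the
-- prefix sums of l started at c, with k added to the count.
lemma mpnLoopA_eq_table (U : Int) (l : List Int) (c k : Int) :
    mpnLoopA U l c k =
      (let pf := mpnAccum c l
       let n := (pf.takeWhile (fun s => decide (s ≤ U))).length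
       if (n : Int) < (pf.length : Int) then some (k + n) else none) := by
  induction l generalizing c k with
  | nil => simp [mpnLoopA, mpnAccum]
  | cons p rest ih =>
    simp only [mpnLoopA, mpnAccum]
    by_cases h : c + p > U
    · have h' : ¬ (c + p ≤ U) := by omega
      simp [h, h']
    · have h' : c + p ≤ U := by omega
      rw [if_neg h, ih (c + p) (k + 1)]
      simp only [List.takeWhile_cons, h', decide_true, List.length_cons]
      push_cast
      simp only [List.length_cons]
      push_cast
      split_ifs with h1 h2
      · congr 1; omega
      · omega
      · omega
      · rfl

-- ===== VERDICT (by name: the statement is the Claim_ definition above) =====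
theorem most_possible_nodes_in_one_district_spec : Claim_equal_most_possible_nodes_in_one_district := by
  intro DG population U _
  unfold Spec_most_possible_nodes_in_one_district most_possible_nodes_in_one_district
    most_possible_nodes_in_one_district_alt
  rw [mpnLoopA_eq_table]
  simp
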